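-- pv_equiv track=rewrite | github.com/nikhilchhokar/nlp-query-engine | backend/api/services/document_processor.py | _chunk_resume
-- ===== SOURCE A (Python) =====
-- from typing import List, Dict, Any, Optional
--
-- def _chunk_resume(content: str) -> List[str]:
--     """Chunk resume by sections"""
--     # Common resume sections
--     section_headers = [
--         'education', 'experience', 'skills', 'work experience',
--         'professional experience', 'certifications', 'projects',
--         'summary', 'objective', 'qualifications'
--     ]
--
--     chunks = []
--     current_chunk = []
--
--     for line in content.split('\n'):
--         line_lower = line.lower().strip()
--
--         # Check if line is a section header
--         is_header = any(header in line_lower for header in section_headers)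
--
--         if is_header and current_chunk:
--             # Start new chunk
--             chunks.append('\n'.join(current_chunk))
--             current_chunk = [line]
--         else:
--             current_chunk.append(line)
--
--     # Add final chunk
--     if current_chunk:
--         chunks.append('\n'.join(current_chunk))
--
--     return chunks if chunks else [content]
-- ===== SOURCE B (Python) =====
-- from typing import List
--
-- def _chunk_resume(content: str) -> List[str]:
--     """Chunk resume by sections (span-based: consume one header+body group per outer step)"""
--     section_headers = [
--         'education', 'experience', 'skills', 'work experience',
--         'professional experience', 'certifications', 'projects',
--         'summary', 'objective', 'qualifications'
--     ]
--
--     def _is_header(line: str) -> bool: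
--         ll = line.lower().strip()
--         return any(h in ll for h in section_headers)
--
--     lines = content.split('\n')
--     chunks = []
--     rest = lines
--     while rest:
--         head, rest = rest[0], rest[1:]
--         body = []
--         while rest and not _is_header(rest[0]):
--             body.append(rest[0])
--             rest = rest[1:]
--         chunks.append('\n'.join([head] + body))
--     return chunks if chunks else [content]
-- ===== Notes on version B (the rewrite author's own statement) =====
-- stated objective: alternative
-- what changed: Replaces A's single pass with a running buffer flushed on each header line by a span-based decomposition: an outer loop that, per chunk, takes the first line and an inner loop that consumes the following non-header lines, emitting each chunk as it is completed.
import Mathlib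
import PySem

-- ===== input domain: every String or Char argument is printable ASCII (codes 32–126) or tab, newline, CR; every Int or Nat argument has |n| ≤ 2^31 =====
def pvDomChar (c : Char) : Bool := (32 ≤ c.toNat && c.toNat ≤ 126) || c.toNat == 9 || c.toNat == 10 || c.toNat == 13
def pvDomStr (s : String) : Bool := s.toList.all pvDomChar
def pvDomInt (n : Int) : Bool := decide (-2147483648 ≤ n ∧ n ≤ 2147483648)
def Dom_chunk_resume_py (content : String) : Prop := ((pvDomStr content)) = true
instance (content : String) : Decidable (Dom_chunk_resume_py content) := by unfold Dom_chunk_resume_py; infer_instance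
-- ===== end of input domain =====

-- B replaces A's running-buffer single pass by a span-based group-at-a-time decomposition; same cost, no behaviour change.

-- the section-header list both Pythons declare verbatim (kept at List Char level: ports work on content.toList)
def pvSectionHeaders : List (List Char) :=
  ["education".toList, "experience".toList, "skills".toList, "work experience".toList,
   "professional experience".toList, "certifications".toList, "projects".toList,
   "summary".toList, "objective".toList, "qualifications".toList]

-- ===== PORT A =====
-- literal transliteration of A: one fold over the lines carrying (chunks, current_chunk)
def chunk_resume_py (content : String) : List String :=
  let lines := PySem.Chars.splitOn content.toList ['\n']
  let st := lines.foldl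
    (fun (st : List (List Char) × List (List Char)) line =>
      let lineLower := PySem.Chars.strip (PySem.Chars.lower line)
      let isHeader := pvSectionHeaders.any (fun h => PySem.Chars.isIn h lineLower)
      if isHeader && !st.2.isEmpty then
        (st.1 ++ [PySem.Chars.join ['\n'] st.2], [line])
      else
        (st.1, st.2 ++ [line]))
    ([], [])
  let chunks := if !st.2.isEmpty then st.1 ++ [PySem.Chars.join ['\n'] st.2] else st.1
  if chunks.isEmpty then [content] else chunks.map (fun cs => String.ofList cs)

-- ===== PORT B =====
-- B's _is_header helper
def pvIsHeaderB (line : List Char) : Bool :=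
  pvSectionHeaders.any (fun h => PySem.Chars.isIn h (PySem.Chars.strip (PySem.Chars.lower line)))

-- B's inner while loop: consume the non-header body lines, return (body, remaining lines)
def pvTakeBody : List (List Char) → List (List Char) × List (List Char)
  | [] => ([], [])
  | l :: rest =>
    if pvIsHeaderB l then ([], l :: rest)
    else
      let p := pvTakeBody rest
      (l :: p.1, p.2)

-- termination fact for B's outer loop (cited by pvGroups' decreasing_by)
theorem pvTakeBody_snd_length_le (xs : List (List Char)) : (pvTakeBody xs).2.length ≤ xs.length := by
  induction xs with
  | nil => simp [pvTakeBody]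
  | cons l rest ih =>
    simp only [pvTakeBody]
    split
    · simp
    · simpa using Nat.le_succ_of_le ih

-- B's outer while loop: one chunk (head line + body) per iteration
def pvGroups : List (List Char) → List (List Char)
  | [] => []
  | head :: rest =>
    let p := pvTakeBody rest
    PySem.Chars.join ['\n'] (head :: p.1) :: pvGroups p.2
termination_by xs => xs.length
decreasing_by
  exact Nat.lt_succ_of_le (pvTakeBody_snd_length_le rest)

def chunk_resume_py_alt (content : String) : List String :=
  let lines := PySem.Chars.splitOn content.toList ['\n']
  let chunks := pvGroups lines
  if chunks.isEmpty then [content] else chunks.map (fun cs => String.ofList cs)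

-- ===== PRECONDITION & SPEC =====
def Spec_chunk_resume_py (content : String) (out : List String) : Prop := out = chunk_resume_py_alt content
instance (content : String) (out : List String) : Decidable (Spec_chunk_resume_py content out) := by unfold Spec_chunk_resume_py; infer_instance

-- ===== CLAIM (what is proved, stated in full; the proofs are below) =====
def Claim_equal_chunk_resume_py : Prop := ∀ (content : String), Dom_chunk_resume_py content → Spec_chunk_resume_py content (chunk_resume_py content)

-- ===== LEMMAS AND PROOFS =====

-- named form of A's loop body (definitionally equal to the lambda in the port)
def pvStepA (st : List (List Char) × List (List Char)) (line : List Char) :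
    List (List Char) × List (List Char) :=
  if pvIsHeaderB line && !st.2.isEmpty then
    (st.1 ++ [PySem.Chars.join ['\n'] st.2], [line])
  else
    (st.1, st.2 ++ [line])

theorem pvStepA_eq :
    (fun (st : List (List Char) × List (List Char)) (line : List Char) =>
      if ((pvSectionHeaders.any fun h => PySem.Chars.isIn h (PySem.Chars.strip (PySem.Chars.lower line))) &&
          !st.2.isEmpty) = true then
        (st.1 ++ [PySem.Chars.join ['\n'] st.2], [line])
      else (st.1, st.2 ++ [line]))
    = pvStepA := rfl

-- common recursive characterisation: chunking with a nonempty current buffer `cur`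
def pvGoA (cur : List (List Char)) : List (List Char) → List (List Char)
  | [] => [PySem.Chars.join ['\n'] cur]
  | l :: rs =>
    if pvIsHeaderB l then PySem.Chars.join ['\n'] cur :: pvGoA [l] rs
    else pvGoA (cur ++ [l]) rs

-- A's fold (with the final flush) computes pvGoA, for any nonempty buffer
theorem pvFoldA_eq_pvGoA (rest : List (List Char)) :
    ∀ (chunks cur : List (List Char)), cur ≠ [] →
    (if !(rest.foldl pvStepA (chunks, cur)).2.isEmpty then
        (rest.foldl pvStepA (chunks, cur)).1 ++
          [PySem.Chars.join ['\n'] (rest.foldl pvStepA (chunks, cur)).2]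
      else (rest.foldl pvStepA (chunks, cur)).1)
    = chunks ++ pvGoA cur rest := by
  induction rest with
  | nil =>
    intro chunks cur hcur
    simp [pvGoA, hcur]
  | cons l rs ih =>
    intro chunks cur hcur
    have hcur' : cur.isEmpty = false := by simpa [List.isEmpty_iff] using hcur
    simp only [List.foldl_cons]
    by_cases h : pvIsHeaderB l
    · have hstep : pvStepA (chunks, cur) l = (chunks ++ [PySem.Chars.join ['\n'] cur], [l]) := by
        simp [pvStepA, h, hcur']
      rw [hstep, ih (chunks ++ [PySem.Chars.join ['\n'] cur]) [l] (by simp)]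
      simp [pvGoA, h]
    · have hstep : pvStepA (chunks, cur) l = (chunks, cur ++ [l]) := by
        simp [pvStepA, h]
      rw [hstep, ih chunks (cur ++ [l]) (by simp)]
      simp [pvGoA, h]

-- B's span recursion computes pvGoA as well
theorem pvGoA_eq_groups (rest : List (List Char)) :
    ∀ (cur : List (List Char)),
    pvGoA cur rest
      = PySem.Chars.join ['\n'] (cur ++ (pvTakeBody rest).1) :: pvGroups (pvTakeBody rest).2 := by
  induction rest with
  | nil => intro cur; simp [pvGoA, pvTakeBody, pvGroups]
  | cons l rs ih =>
    intro cur
    by_cases h : pvIsHeaderB l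
    · simp only [pvGoA, h, if_true, pvTakeBody]
      rw [ih [l]]
      simp [pvGroups]
    · simp only [pvGoA, h, pvTakeBody]
      rw [ih (cur ++ [l])]
      simp

-- content.split('\n') is never the empty list
theorem pvSplitOnGo_ne_nil (fuel : Nat) :
    ∀ (sep l cur : List Char) (acc : List (List Char)),
    PySem.Chars.splitOn.go sep fuel l cur acc ≠ [] := by
  induction fuel with
  | zero => intro sep l cur acc; simp [PySem.Chars.splitOn.go]
  | succ n ih =>
    intro sep l cur acc
    cases l with
    | nil => simp [PySem.Chars.splitOn.go]
    | cons c rest =>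
      simp only [PySem.Chars.splitOn.go]
      split
      · exact ih _ _ _ _
      · exact ih _ _ _ _

theorem pvSplitOn_ne_nil (s sep : List Char) : PySem.Chars.splitOn s sep ≠ [] := by
  unfold PySem.Chars.splitOn
  exact pvSplitOnGo_ne_nil _ _ _ _ _

-- ===== VERDICT (by name: the statement is the Claim_ definition above) =====
theorem chunk_resume_py_spec : Claim_equal_chunk_resume_py := by
  intro content _
  unfold Spec_chunk_resume_py chunk_resume_py chunk_resume_py_alt
  obtain ⟨l0, rest, hlines⟩ :=
    List.exists_cons_of_ne_nil (pvSplitOn_ne_nil content.toList ['\n'])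
  simp only [hlines]
  rw [pvStepA_eq]
  simp only [List.foldl_cons]
  have hfirst : pvStepA (([], []) : List (List Char) × List (List Char)) l0 = ([], [l0]) := by
    simp [pvStepA]
  rw [hfirst, pvFoldA_eq_pvGoA rest [] [l0] (by simp)]
  rw [pvGoA_eq_groups rest [l0]]
  simp [pvGroups]
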